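-- pv_equiv track=rewrite | github.com/sha2fiddy/mempalace | benchmarks/model_eval/summarize.py | render_vram_table
-- ===== SOURCE A (Python) =====
-- def render_vram_table(rows: list[dict]) -> str:
--     by_model: dict[str, dict] = {}
--     for r in rows:
--         if r.get("error"):
--             continue
--         tag = r["model_tag"]
--         if tag not in by_model:
--             by_model[tag] = {"resident": r.get("vram_resident_mb"), "peak": r.get("vram_peak_mb")}
--         else:
--             cur_peak = by_model[tag]["peak"]
--             new_peak = r.get("vram_peak_mb")
--             if new_peak and (not cur_peak or int(new_peak) > int(cur_peak)):
--                 by_model[tag]["peak"] = new_peak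
--             if not by_model[tag]["resident"] and r.get("vram_resident_mb"):
--                 by_model[tag]["resident"] = r.get("vram_resident_mb")
--
--     rows_sorted = sorted(
--         by_model.items(),
--         key=lambda kv: int(kv[1]["resident"] or 0),
--     )
--     lines = ["| Model | Resident MB | Peak MB | Delta MB |", "|---|---|---|---|"]
--     for tag, vram in rows_sorted:
--         resident = vram["resident"]
--         peak = vram["peak"]
--         try:
--             delta = int(peak) - int(resident) if resident and peak else None
--         except (TypeError, ValueError):
--             delta = None
--         lines.append(f"| {tag} | {resident or '—'} | {peak or '—'} | {delta if delta is not None else '—'} |")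
--     return "\n".join(lines) + "\n"
-- ===== SOURCE B (Python) =====
-- def _agg(rs):
--     # first truthy resident (else first row's resident); first-maximal truthy peak by int (else first row's peak)
--     residents = [r.get("vram_resident_mb") for r in rs]
--     truthy_res = [v for v in residents if v]
--     resident = truthy_res[0] if truthy_res else residents[0]
--     peaks = [v for v in (r.get("vram_peak_mb") for r in rs) if v]
--     if peaks:
--         peak = peaks[0]
--         for p in peaks[1:]:
--             if int(p) > int(peak):
--                 peak = p
--     else:
--         peak = rs[0].get("vram_peak_mb")
--     return (resident, peak)
--
--
-- def _fmt(tag, resident, peak):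
--     try:
--         delta = int(peak) - int(resident) if resident and peak else None
--     except (TypeError, ValueError):
--         delta = None
--     return f"| {tag} | {resident or '—'} | {peak or '—'} | {delta if delta is not None else '—'} |"
--
--
-- def render_vram_table(rows: list[dict]) -> str:
--     # pass 1: group non-error rows by model tag, in first-appearance order
--     groups: dict = {}
--     for r in rows:
--         if r.get("error"):
--             continue
--         groups.setdefault(r["model_tag"], []).append(r)
--     # pass 2: aggregate each group, then sort (stable) by int(resident or 0)
--     stats = sorted(
--         ((tag, _agg(rs)) for tag, rs in groups.items()),
--         key=lambda kv: int(kv[1][0] or 0),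
--     )
--     header = ["| Model | Resident MB | Peak MB | Delta MB |", "|---|---|---|---|"]
--     body = [_fmt(tag, res, peak) for tag, (res, peak) in stats]
--     return "\n".join(header + body) + "\n"
-- ===== Notes on version B (the rewrite author's own statement) =====
-- stated objective: alternative
-- what changed: B replaces A's single online dict-update loop by a two-pass decomposition: it first groups non-error rows by model tag, then aggregates each group (first truthy resident, first-maximal truthy peak by int); sorting and markdown formatting are unchanged.
import Mathlib
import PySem

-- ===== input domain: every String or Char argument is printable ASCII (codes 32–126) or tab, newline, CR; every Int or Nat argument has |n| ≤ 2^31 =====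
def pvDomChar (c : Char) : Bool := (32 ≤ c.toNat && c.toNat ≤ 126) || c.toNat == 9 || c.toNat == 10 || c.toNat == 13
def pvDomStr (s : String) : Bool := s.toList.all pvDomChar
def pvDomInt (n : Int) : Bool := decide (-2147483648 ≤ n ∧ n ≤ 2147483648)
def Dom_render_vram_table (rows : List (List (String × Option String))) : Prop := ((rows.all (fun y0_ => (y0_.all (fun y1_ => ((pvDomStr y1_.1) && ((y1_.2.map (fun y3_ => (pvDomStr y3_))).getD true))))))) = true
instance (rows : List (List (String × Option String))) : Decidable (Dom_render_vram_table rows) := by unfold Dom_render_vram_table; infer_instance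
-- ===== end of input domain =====

-- B groups the non-error rows by model tag first and aggregates each group in a second
-- pass (first truthy resident, first-maximal truthy peak), instead of A's single online
-- dict-update loop; sorting and formatting are unchanged.  Objective: alternative decomposition.

-- shared leaf helpers (Python truthiness / lookup / int() / str() on Optional[str] values)
def pvTv (v : Option String) : Bool := match v with | some s => !(s == "") | none => false
def pvSVal (v : Option String) : String := v.getD ""
def pvIVal (v : Option String) : Int := (PySem.Int.ofStr? (pvSVal v)).getD 0
def pvGet (r : List (String × Option String)) (k : String) : Option String :=
  PySem.Dict.getD (PySem.Dict.mk r) k none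
def pvTagStr (t : Option String) : String := match t with | some s => s | none => "None"
def pvKey (kv : Option String × (Option String × Option String)) : Int :=
  if pvTv kv.2.1 then pvIVal kv.2.1 else 0
def pvDelta (res pk : Option String) : Option Int :=
  if pvTv res && pvTv pk then
    match PySem.Int.ofStr? (pvSVal pk), PySem.Int.ofStr? (pvSVal res) with
    | some a, some b => some (a - b)
    | _, _ => none
  else none

-- ===== PORT A =====
-- one iteration of A's loop over rows: update by_model (an insert at the row's tag either way)
def stepA (d : PySem.Dict (Option String) (Option String × Option String))
    (r : List (String × Option String)) :
    PySem.Dict (Option String) (Option String × Option String) :=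
  if pvTv (pvGet r "error") then d
  else
    let tag := pvGet r "model_tag"
    let newv :=
      match d.get? tag with
      | none => (pvGet r "vram_resident_mb", pvGet r "vram_peak_mb")
      | some v =>
        let newpk := pvGet r "vram_peak_mb"
        let pk' := if pvTv newpk && (!pvTv v.2 || decide (pvIVal newpk > pvIVal v.2)) then newpk else v.2
        let newres := pvGet r "vram_resident_mb"
        let res' := if !pvTv v.1 && pvTv newres then newres else v.1
        (res', pk')
    d.insert tag newv

def render_vram_table (rows : List (List (String × Option String))) : String :=
  let by_model := rows.foldl stepA PySem.Dict.empty
  let rows_sorted := PySem.List.sorted by_model.items pvKey false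
  let lines := rows_sorted.foldl
    (fun acc kv =>
      acc ++ ["| " ++ pvTagStr kv.1 ++ " | " ++ (if pvTv kv.2.1 then pvSVal kv.2.1 else "—")
        ++ " | " ++ (if pvTv kv.2.2 then pvSVal kv.2.2 else "—") ++ " | "
        ++ (match pvDelta kv.2.1 kv.2.2 with | some d => PySem.Int.toStr d | none => "—") ++ " |"])
    ["| Model | Resident MB | Peak MB | Delta MB |", "|---|---|---|---|"]
  PySem.Str.join "\n" lines ++ "\n"

-- ===== PORT B =====
-- Source B _agg: aggregate one group of rows
def aggB (rs : List (List (String × Option String))) : Option String × Option String :=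
  let residents := rs.map (fun r => pvGet r "vram_resident_mb")
  let truthy_res := residents.filter pvTv
  let resident := match truthy_res with | v :: _ => v | [] => residents.headD none
  let peaks := (rs.map (fun r => pvGet r "vram_peak_mb")).filter pvTv
  let peak :=
    match peaks with
    | [] => pvGet (rs.headD []) "vram_peak_mb"
    | p :: ps => ps.foldl (fun cur q => if pvIVal q > pvIVal cur then q else cur) p
  (resident, peak)

-- Source B _fmt
def fmtB (tag : Option String) (res pk : Option String) : String :=
  "| " ++ pvTagStr tag ++ " | " ++ (if pvTv res then pvSVal res else "—")
    ++ " | " ++ (if pvTv pk then pvSVal pk else "—") ++ " | "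
    ++ (match pvDelta res pk with | some d => PySem.Int.toStr d | none => "—") ++ " |"

-- Source B pass 1: groups.setdefault(tag, []).append(r)
def groupStep (g : PySem.Dict (Option String) (List (List (String × Option String))))
    (r : List (String × Option String)) :
    PySem.Dict (Option String) (List (List (String × Option String))) :=
  if pvTv (pvGet r "error") then g
  else g.modify (pvGet r "model_tag") [] (· ++ [r])

def render_vram_table_alt (rows : List (List (String × Option String))) : String :=
  let groups := rows.foldl groupStep PySem.Dict.empty
  let stats := PySem.List.sorted (groups.items.map (fun kv => (kv.1, aggB kv.2))) pvKey false
  let header := ["| Model | Resident MB | Peak MB | Delta MB |", "|---|---|---|---|"]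
  let body := stats.map (fun kv => fmtB kv.1 kv.2.1 kv.2.2)
  PySem.Str.join "\n" (header ++ body) ++ "\n"

-- ===== PRECONDITION & SPEC =====
-- Pre_ excludes exactly the inputs where the Python A raises: a non-error row without a
-- "model_tag" key (KeyError), a group whose first truthy vram_resident_mb is not int-parseable
-- (ValueError in the sort key), or a group with two or more truthy vram_peak_mb values of which
-- some is not int-parseable (ValueError while comparing peaks).
def Pre_render_vram_table (rows : List (List (String × Option String))) : Prop :=
  let keep := rows.filter (fun r => !pvTv (pvGet r "error"))
  (∀ r ∈ keep, (PySem.Dict.mk r).contains "model_tag" = true) ∧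
  (∀ r ∈ keep,
    let g := keep.filter (fun r' => pvGet r' "model_tag" == pvGet r "model_tag")
    (∀ v ∈ ((g.map (fun r' => pvGet r' "vram_resident_mb")).filter pvTv).take 1,
      (PySem.Int.ofStr? (pvSVal v)).isSome = true) ∧
    (let pks := (g.map (fun r' => pvGet r' "vram_peak_mb")).filter pvTv
     1 < pks.length → ∀ p ∈ pks, (PySem.Int.ofStr? (pvSVal p)).isSome = true))
instance (rows : List (List (String × Option String))) : Decidable (Pre_render_vram_table rows) := by
  unfold Pre_render_vram_table; infer_instance

def pvWitness_render_vram_table : (List (List (String × Option String))) :=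
  [[("model_tag", some "m1"), ("vram_resident_mb", some "4"), ("vram_peak_mb", some "9")],
   [("model_tag", some "m1"), ("vram_peak_mb", some "12")],
   [("model_tag", some "m2"), ("vram_resident_mb", some "2")]]

def Spec_render_vram_table (rows : List (List (String × Option String))) (out : String) : Prop := out = render_vram_table_alt rows
instance (rows : List (List (String × Option String))) (out : String) : Decidable (Spec_render_vram_table rows out) := by unfold Spec_render_vram_table; infer_instance

-- ===== CLAIM (what is proved, stated in full; the proofs are below) =====
def Claim_equal_render_vram_table : Prop := ∀ (rows : List (List (String × Option String))), Dom_render_vram_table rows → Pre_render_vram_table rows → Spec_render_vram_table rows (render_vram_table rows)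

-- ===== LEMMAS AND PROOFS =====

-- proof-side abbreviations for the two loops
def keepR (r : List (String × Option String)) : Bool := !pvTv (pvGet r "error")
def rTag (r : List (String × Option String)) : Option String := pvGet r "model_tag"
def initV (r : List (String × Option String)) : Option String × Option String :=
  (pvGet r "vram_resident_mb", pvGet r "vram_peak_mb")
def resStep (cur : Option String) (r : List (String × Option String)) : Option String :=
  if !pvTv cur && pvTv (pvGet r "vram_resident_mb") then pvGet r "vram_resident_mb" else cur
def pkStep (cur : Option String) (r : List (String × Option String)) : Option String :=
  if pvTv (pvGet r "vram_peak_mb") && (!pvTv cur || decide (pvIVal (pvGet r "vram_peak_mb") > pvIVal cur)) then pvGet r "vram_peak_mb" else cur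
def stepV (v : Option String × Option String) (r : List (String × Option String)) :
    Option String × Option String := (resStep v.1 r, pkStep v.2 r)
def updA (d : PySem.Dict (Option String) (Option String × Option String))
    (r : List (String × Option String)) : Option String × Option String :=
  match d.get? (rTag r) with | none => initV r | some v => stepV v r
def stepA' (d : PySem.Dict (Option String) (Option String × Option String))
    (r : List (String × Option String)) : PySem.Dict (Option String) (Option String × Option String) :=
  d.insert (rTag r) (updA d r)
def groupStep' (g : PySem.Dict (Option String) (List (List (String × Option String))))
    (r : List (String × Option String)) : PySem.Dict (Option String) (List (List (String × Option String))) :=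
  g.modify (rTag r) [] (· ++ [r])
def maxStep (cur q : Option String) : Option String := if pvIVal q > pvIVal cur then q else cur

theorem stepA_eq : stepA = fun d r => if keepR r then stepA' d r else d := by
  funext d r
  simp only [stepA, stepA', updA, stepV, resStep, pkStep, initV, keepR, rTag]
  cases h : pvTv (pvGet r "error") <;> simp_all

theorem groupStep_eq : groupStep = fun g r => if keepR r then groupStep' g r else g := by
  funext g r
  simp only [groupStep, groupStep', keepR, rTag]
  cases h : pvTv (pvGet r "error") <;> simp_all

theorem keysA (l : List (List (String × Option String))) :
    (l.foldl stepA' PySem.Dict.empty).keys = PySem.Set.ofList (l.map rTag) := by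
  have h := PySem.Dict.keys_foldl_insert_key (l := l) (key := rTag) (f := updA) (d := PySem.Dict.empty)
  simpa [stepA', PySem.Dict.keys_empty] using h

theorem nodupA (l : List (List (String × Option String))) :
    (l.foldl stepA' PySem.Dict.empty).keys.Nodup := by
  have h := PySem.Dict.nodup_keys_foldl_insert_key (l := l) (key := rTag) (f := updA)
    (d := PySem.Dict.empty) (by simp [PySem.Dict.keys_empty])
  simpa [stepA'] using h

theorem keysB (l : List (List (String × Option String))) :
    (l.foldl groupStep' PySem.Dict.empty).keys = PySem.Set.ofList (l.map rTag) := by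
  have h := PySem.Dict.keys_foldl_modify_key (l := l) (key := rTag) (d0 := [])
    (f := fun _ r => (· ++ [r])) (d := PySem.Dict.empty)
  simpa [groupStep', PySem.Dict.keys_empty] using h

theorem nodupB (l : List (List (String × Option String))) :
    (l.foldl groupStep' PySem.Dict.empty).keys.Nodup := by
  have h := PySem.Dict.nodup_keys_foldl_modify_key (l := l) (key := rTag) (d0 := [])
    (f := fun _ r => (· ++ [r])) (d := PySem.Dict.empty) (by simp [PySem.Dict.keys_empty])
  simpa [groupStep'] using h

theorem lemB_getD (l : List (List (String × Option String))) (t : Option String) :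
    (l.foldl groupStep' PySem.Dict.empty).getD t [] = l.filter (fun r => rTag r == t) := by
  have hfold : l.foldl groupStep' PySem.Dict.empty =
      (l.map (fun r => (rTag r, r))).foldl (fun d p => d.modify p.1 [] (· ++ [p.2])) PySem.Dict.empty := by
    rw [List.foldl_map]; rfl
  rw [hfold, PySem.Dict.getD_foldl_modify_append]
  simp [PySem.Dict.getD_empty, List.filter_map, Function.comp_def, List.map_map]

theorem lemA_getD (l : List (List (String × Option String))) (t : Option String) :
    (l.foldl stepA' PySem.Dict.empty).getD t (none, none) =
      match l.filter (fun r => rTag r == t) with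
      | [] => (none, none)
      | r0 :: rest => rest.foldl stepV (initV r0) := by
  induction l using List.reverseRecOn with
  | nil => simp [PySem.Dict.getD_empty]
  | append_singleton l r ih =>
    rw [List.foldl_append, List.foldl_cons, List.foldl_nil, List.filter_append]
    by_cases ht : rTag r = t
    · have hbeq : (rTag r == t) = true := by simp [ht]
      simp only [stepA', ht, PySem.Dict.getD_insert_self]
      simp only [List.filter_cons, hbeq, if_true, List.filter_nil]
      rcases hfl : l.filter (fun r' => rTag r' == t) with _ | ⟨r0, rest⟩
      · have hnot : t ∉ (l.foldl stepA' PySem.Dict.empty).keys := by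
          rw [keysA, PySem.Set.mem_ofList]
          intro hmem
          obtain ⟨r', hr', hr't⟩ := List.mem_map.mp hmem
          have : ¬(rTag r' == t) = true := by
            have := List.filter_eq_nil_iff.mp hfl r' hr'
            simpa using this
          exact this (by simp [hr't])
        have hnone : (l.foldl stepA' PySem.Dict.empty).get? t = none := by
          rw [PySem.Dict.get?_eq_none_iff_contains]
          by_contra hc
          exact hnot ((PySem.Dict.contains_iff_mem_keys _ _).mp (by revert hc; cases (l.foldl stepA' PySem.Dict.empty).contains t <;> simp))
        simp [updA, ht, hnone]
      · have hmem : t ∈ (l.foldl stepA' PySem.Dict.empty).keys := by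
          rw [keysA, PySem.Set.mem_ofList]
          have hr0 : r0 ∈ l.filter (fun r' => rTag r' == t) := by rw [hfl]; exact List.mem_cons_self
          have hr0l : r0 ∈ l := List.mem_of_mem_filter hr0
          have : (rTag r0 == t) = true := (List.mem_filter.mp hr0).2
          exact List.mem_map.mpr ⟨r0, hr0l, by simpa using this⟩
        rcases hv : (l.foldl stepA' PySem.Dict.empty).get? t with _ | v
        · exact absurd hmem (by
            rw [← PySem.Dict.contains_iff_mem_keys]
            simp [(PySem.Dict.get?_eq_none_iff_contains _ _).mp hv])
        · have hvv : v = rest.foldl stepV (initV r0) := by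
            have hgd := PySem.Dict.getD_of_get?_eq_some (l.foldl stepA' PySem.Dict.empty) ((none, none) : Option String × Option String) hv
            rw [← hgd, ih, hfl]
          simp [updA, ht, hv, hvv, List.foldl_append]
    · have hbeq : (rTag r == t) = false := by simp [ht]
      simp only [stepA']
      rw [PySem.Dict.getD_insert_of_ne _ _ _ (fun h => ht h.symm)]
      simp only [List.filter_cons, hbeq, List.filter_nil, List.append_nil, Bool.false_eq_true, if_false]
      exact ih

theorem resLemma (rest : List (List (String × Option String))) (init : Option String) :
    rest.foldl resStep init =
      if pvTv init then init
      else ((rest.map (fun r => pvGet r "vram_resident_mb")).filter pvTv).headD init := by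
  induction rest generalizing init with
  | nil => cases h : pvTv init <;> simp [h]
  | cons r rest ih =>
    rw [List.foldl_cons]
    cases hi : pvTv init with
    | true => simp [resStep, hi, ih]
    | false =>
      cases hr : pvTv (pvGet r "vram_resident_mb") with
      | true => simp [resStep, hi, hr, ih]
      | false => simp [resStep, hi, hr, ih]

theorem pkP1 (rest : List (List (String × Option String))) (cur : Option String)
    (h : pvTv cur = true) :
    rest.foldl pkStep cur = ((rest.map (fun r => pvGet r "vram_peak_mb")).filter pvTv).foldl maxStep cur := by
  induction rest generalizing cur with
  | nil => simp
  | cons r rest ih =>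
    rw [List.foldl_cons]
    cases hr : pvTv (pvGet r "vram_peak_mb") with
    | true =>
      have hstep : pkStep cur r = maxStep cur (pvGet r "vram_peak_mb") := by
        simp [pkStep, maxStep, hr, h]
      have hcur' : pvTv (maxStep cur (pvGet r "vram_peak_mb")) = true := by
        unfold maxStep; split <;> simp [hr, h]
      rw [hstep]
      simp only [List.map_cons, List.filter_cons, hr, if_true, List.foldl_cons]
      exact ih _ hcur'
    | false =>
      have hstep : pkStep cur r = cur := by simp [pkStep, hr]
      rw [hstep]
      simp only [List.map_cons, List.filter_cons, hr, Bool.false_eq_true, if_false]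
      exact ih _ h

theorem pkP2 (rest : List (List (String × Option String))) (cur : Option String)
    (h : pvTv cur = false) :
    rest.foldl pkStep cur =
      match (rest.map (fun r => pvGet r "vram_peak_mb")).filter pvTv with
      | [] => cur
      | p :: ps => ps.foldl maxStep p := by
  induction rest generalizing cur with
  | nil => simp
  | cons r rest ih =>
    rw [List.foldl_cons]
    cases hr : pvTv (pvGet r "vram_peak_mb") with
    | true =>
      have hstep : pkStep cur r = pvGet r "vram_peak_mb" := by simp [pkStep, hr, h]
      rw [hstep]
      simp only [List.map_cons, List.filter_cons, hr, if_true]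
      exact pkP1 rest _ hr
    | false =>
      have hstep : pkStep cur r = cur := by simp [pkStep, hr]
      rw [hstep]
      simp only [List.map_cons, List.filter_cons, hr, Bool.false_eq_true, if_false]
      exact ih _ h

theorem agg_eq (r0 : List (String × Option String)) (rest : List (List (String × Option String))) :
    rest.foldl stepV (initV r0) = aggB (r0 :: rest) := by
  have hsplit : rest.foldl stepV (initV r0) =
      (rest.foldl resStep (pvGet r0 "vram_resident_mb"), rest.foldl pkStep (pvGet r0 "vram_peak_mb")) := by
    simp only [initV]
    exact PySem.List.foldl_prod_mk resStep pkStep rest _ _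
  rw [hsplit]
  simp only [aggB, List.map_cons, List.filter_cons]
  refine Prod.ext ?_ ?_
  · cases h0 : pvTv (pvGet r0 "vram_resident_mb") with
    | true => simp [resLemma, h0]
    | false =>
      rw [resLemma rest _]
      simp only [h0, Bool.false_eq_true, if_false]
      rcases hf : (rest.map (fun r => pvGet r "vram_resident_mb")).filter pvTv with _ | ⟨v, vs⟩ <;> simp
  · cases h0 : pvTv (pvGet r0 "vram_peak_mb") with
    | true =>
      rw [pkP1 rest _ h0]
      simp only [h0, if_true]
      rfl
    | false =>
      rw [pkP2 rest _ h0]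
      simp only [h0, Bool.false_eq_true, if_false]
      rcases hf : (rest.map (fun r => pvGet r "vram_peak_mb")).filter pvTv with _ | ⟨p, ps⟩
      · simp
      · rfl

theorem items_eq (rows : List (List (String × Option String))) :
    (rows.foldl stepA PySem.Dict.empty).items =
      (rows.foldl groupStep PySem.Dict.empty).items.map (fun kv => (kv.1, aggB kv.2)) := by
  rw [stepA_eq, groupStep_eq,
    PySem.List.foldl_if_eq_foldl_filter keepR stepA',
    PySem.List.foldl_if_eq_foldl_filter keepR groupStep']
  set l := rows.filter keepR with hl
  rw [PySem.Dict.items_eq_map_keys _ (nodupA l) ((none, none) : Option String × Option String),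
      PySem.Dict.items_eq_map_keys _ (nodupB l) ([] : List (List (String × Option String)))]
  rw [keysA, keysB, List.map_map]
  apply List.map_congr_left
  intro t ht
  rw [PySem.Set.mem_ofList] at ht
  obtain ⟨r', hr', hrt⟩ := List.mem_map.mp ht
  simp only [Function.comp_def]
  rw [lemA_getD, lemB_getD]
  rcases hfl : l.filter (fun r => rTag r == t) with _ | ⟨r0, rest⟩
  · exfalso
    have := List.filter_eq_nil_iff.mp hfl r' hr'
    simp [hrt] at this
  · simp [agg_eq]

theorem main_eq (rows : List (List (String × Option String))) :
    render_vram_table rows = render_vram_table_alt rows := by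
  simp only [render_vram_table, render_vram_table_alt]
  rw [items_eq, PySem.List.foldl_append_singleton_eq_map]
  rfl

-- ===== VERDICT =====
theorem render_vram_table_spec : Claim_equal_render_vram_table := by
  intro rows _ _
  exact main_eq rows
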